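-- pv_equiv track=rewrite | github.com/rupesh43210/cvss_calculator | cvss_calculator.py | create_v40_vector_string
-- ===== SOURCE A (Python) =====
-- from typing import Dict, Optional, Any
--
-- def create_v40_vector_string(metrics: Dict[str, str]) -> str:
--     """Create CVSS v4.0 vector string from metrics"""
--     # Define metric groups
--     base_metrics = ['AV', 'AC', 'AT', 'PR', 'UI', 'VC', 'VI', 'VA', 'SC', 'SI', 'SA']
--     threat_metrics = ['E']
--     environmental_metrics = ['CR', 'IR', 'AR', 'MAV', 'MAC', 'MAT', 'MPR', 'MUI', 'MVC', 'MVI', 'MVA']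
--     supplemental_metrics = ['S', 'AU', 'R', 'U']
--
--     vector_parts = ['CVSS:4.0']
--
--     # Add all metric types
--     for metric_list in [base_metrics, threat_metrics, environmental_metrics, supplemental_metrics]:
--         for metric in metric_list:
--             if metric in metrics:
--                 vector_parts.append(f"{metric}:{metrics[metric]}")
--
--     return '/'.join(vector_parts)
-- ===== SOURCE B (Python) =====
-- def create_v40_vector_string(metrics):
--     """Create CVSS v4.0 vector string from metrics"""
--     master = ['AV', 'AC', 'AT', 'PR', 'UI', 'VC', 'VI', 'VA', 'SC', 'SI', 'SA',
--               'E',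
--               'CR', 'IR', 'AR', 'MAV', 'MAC', 'MAT', 'MPR', 'MUI', 'MVC', 'MVI', 'MVA',
--               'S', 'AU', 'R', 'U']
--     order = {m: i for i, m in enumerate(master)}
--     present = sorted((k for k in metrics if k in order), key=order.__getitem__)
--     return '/'.join(['CVSS:4.0'] + [f"{k}:{metrics[k]}" for k in present])
-- ===== Notes on version B (the rewrite author's own statement) =====
-- stated objective: idiomatic
-- what changed: Instead of scanning four fixed metric-group lists with a membership test per metric, B precomputes one index table over the flattened master list and iterates over the input dict's keys, sorting the known ones by that index before formatting and joining.
import Mathlib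
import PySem

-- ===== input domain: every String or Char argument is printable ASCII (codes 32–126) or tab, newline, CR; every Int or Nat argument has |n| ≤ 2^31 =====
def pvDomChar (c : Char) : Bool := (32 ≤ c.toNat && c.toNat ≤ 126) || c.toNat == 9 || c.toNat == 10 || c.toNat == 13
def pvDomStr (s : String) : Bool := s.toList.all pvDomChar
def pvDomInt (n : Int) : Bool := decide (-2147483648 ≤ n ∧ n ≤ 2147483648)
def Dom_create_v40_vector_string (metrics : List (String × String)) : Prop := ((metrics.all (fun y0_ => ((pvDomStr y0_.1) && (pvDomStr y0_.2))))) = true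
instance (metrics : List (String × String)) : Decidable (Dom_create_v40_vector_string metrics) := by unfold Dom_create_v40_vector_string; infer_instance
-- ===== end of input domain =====

-- B replaces A's scan over four fixed metric-group lists by an index table over the flattened
-- master list and a sort of the input dict's known keys by that index (objective: idiomatic).

-- ===== PORT A =====
def create_v40_vector_string (metrics : List (String × String)) : String :=
  let d := PySem.Dict.ofList metrics
  let base_metrics := ["AV", "AC", "AT", "PR", "UI", "VC", "VI", "VA", "SC", "SI", "SA"]
  let threat_metrics := ["E"]
  let environmental_metrics := ["CR", "IR", "AR", "MAV", "MAC", "MAT", "MPR", "MUI", "MVC", "MVI", "MVA"]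
  let supplemental_metrics := ["S", "AU", "R", "U"]
  let vector_parts := ["CVSS:4.0"]
  let vector_parts :=
    [base_metrics, threat_metrics, environmental_metrics, supplemental_metrics].foldl
      (fun acc metric_list =>
        metric_list.foldl
          (fun acc metric =>
            if d.contains metric then acc ++ [metric ++ ":" ++ d.getD metric ""] else acc)
          acc)
      vector_parts
  PySem.Str.join "/" vector_parts

-- ===== PORT B =====
-- B-side helpers: the flattened master list and the index table {m: i}
def pvMaster : List String :=
  ["AV", "AC", "AT", "PR", "UI", "VC", "VI", "VA", "SC", "SI", "SA",
   "E",
   "CR", "IR", "AR", "MAV", "MAC", "MAT", "MPR", "MUI", "MVC", "MVI", "MVA",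
   "S", "AU", "R", "U"]

def pvOrder : PySem.Dict String Int :=
  (PySem.List.enumerate pvMaster).foldl (fun d p => d.insert p.2 p.1) PySem.Dict.empty

def create_v40_vector_string_alt (metrics : List (String × String)) : String :=
  let d := PySem.Dict.ofList metrics
  let present :=
    PySem.List.sorted ((PySem.Dict.keys d).filter (fun k => pvOrder.contains k))
      (fun k => pvOrder.getD k 0)
  PySem.Str.join "/" ("CVSS:4.0" :: present.map (fun k => k ++ ":" ++ d.getD k ""))

-- ===== PRECONDITION & SPEC =====
def Spec_create_v40_vector_string (metrics : List (String × String)) (out : String) : Prop := out = create_v40_vector_string_alt metrics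
instance (metrics : List (String × String)) (out : String) : Decidable (Spec_create_v40_vector_string metrics out) := by unfold Spec_create_v40_vector_string; infer_instance

-- ===== CLAIM (what is proved, stated in full; the proofs are below) =====
def Claim_equal_create_v40_vector_string : Prop := ∀ (metrics : List (String × String)), Dom_create_v40_vector_string metrics → Spec_create_v40_vector_string metrics (create_v40_vector_string metrics)

-- ===== LEMMAS AND PROOFS =====

-- pvOrder's keys are exactly pvMaster, so 'k in order' is membership in the master list
theorem pvOrder_contains (k : String) : pvOrder.contains k = decide (k ∈ pvMaster) := by
  rw [PySem.Dict.contains_eq_decide_mem_keys]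
  have h : pvOrder.keys = pvMaster := by decide
  rw [h]

-- pvMaster is strictly increasing under the index table's key
theorem pvMaster_pairwise :
    pvMaster.Pairwise (fun a b => pvOrder.getD a 0 < pvOrder.getD b 0) := by decide

theorem pvMaster_nodup : pvMaster.Nodup := by decide

-- B's sorted filtered key list is A's traversal order: master filtered by presence in the dict
theorem present_eq (d : PySem.Dict String String) (hnd : d.keys.Nodup) :
    PySem.List.sorted (d.keys.filter (fun k => pvOrder.contains k))
      (fun k => pvOrder.getD k 0)
      = pvMaster.filter (fun m => d.contains m) := by
  apply PySem.List.sorted_eq_of_perm_of_pairwise_lt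
  · rw [List.perm_ext_iff_of_nodup (pvMaster_nodup.filter _) (hnd.filter _)]
    intro a
    simp only [List.mem_filter, pvOrder_contains, decide_eq_true_eq]
    rw [PySem.Dict.contains_iff_mem_keys]
    tauto
  · exact pvMaster_pairwise.filter _

theorem create_v40_vector_string_eq (metrics : List (String × String)) :
    create_v40_vector_string metrics = create_v40_vector_string_alt metrics := by
  simp only [create_v40_vector_string, create_v40_vector_string_alt]
  rw [present_eq _ (PySem.Dict.nodup_keys_ofList metrics)]
  simp only [List.foldl_cons, List.foldl_nil, PySem.List.foldl_append_if,
    List.append_assoc, ← List.map_append, ← List.filter_append]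
  rfl

-- ===== VERDICT (by name: the statement is the Claim_ definition above) =====
theorem create_v40_vector_string_spec : Claim_equal_create_v40_vector_string := by
  intro metrics _
  exact create_v40_vector_string_eq metrics
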